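-- pv_equiv track=rewrite | github.com/mindbomber/Alignment-Aware-Neural-Architecture--AANA- | scripts/aana_external_validity_hermes_head_to_head.py | risk_domain
-- ===== SOURCE A (Python) =====
-- def risk_domain(category: str, subcategory: str, tool_text: str) -> str:
--     text = f"{category} {subcategory} {tool_text}".lower()
--     if any(token in text for token in ("bank", "finance", "payment", "invoice", "order", "shopping", "commerce")):
--         return "finance" if any(token in text for token in ("bank", "finance", "payment", "invoice")) else "commerce"
--     if any(token in text for token in ("medical", "health", "patient", "pharma", "prescription")):
--         return "healthcare"
--     if any(token in text for token in ("security", "camera", "lock", "alarm", "iot")):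
--         return "security"
--     if any(token in text for token in ("employee", "hr", "payroll")):
--         return "hr"
--     if any(token in text for token in ("student", "education", "course")):
--         return "education"
--     if any(token in text for token in ("legal", "case", "contract")):
--         return "legal"
--     return "personal_productivity"
-- ===== SOURCE B (Python) =====
-- # Text-driven scan: walk the text once and prefix-match keywords at each position,
-- # keeping the smallest (highest-priority) rank seen; decode the rank into its label.
-- LABELS = ("finance", "commerce", "healthcare", "security", "hr", "education", "legal")
--
-- TOKENS = (
--     ("bank", 0), ("finance", 0), ("payment", 0), ("invoice", 0),
--     ("order", 1), ("shopping", 1), ("commerce", 1),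
--     ("medical", 2), ("health", 2), ("patient", 2), ("pharma", 2), ("prescription", 2),
--     ("security", 3), ("camera", 3), ("lock", 3), ("alarm", 3), ("iot", 3),
--     ("employee", 4), ("hr", 4), ("payroll", 4),
--     ("student", 5), ("education", 5), ("course", 5),
--     ("legal", 6), ("case", 6), ("contract", 6),
-- )
--
--
-- def risk_domain(category: str, subcategory: str, tool_text: str) -> str:
--     text = f"{category} {subcategory} {tool_text}".lower()
--     best = len(LABELS)
--     for i in range(len(text)):
--         for tok, rank in TOKENS:
--             if rank < best and text.startswith(tok, i):
--                 best = rank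
--     return LABELS[best] if best < len(LABELS) else "personal_productivity"
-- ===== Notes on version B (the rewrite author's own statement) =====
-- stated objective: alternative
-- what changed: Instead of A's tiered any(keyword in text) if-chain, B walks the lowered text once position by position, prefix-matches the keyword table at each position, keeps the minimum priority rank seen, and decodes that rank into a label at the end.
import Mathlib
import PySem

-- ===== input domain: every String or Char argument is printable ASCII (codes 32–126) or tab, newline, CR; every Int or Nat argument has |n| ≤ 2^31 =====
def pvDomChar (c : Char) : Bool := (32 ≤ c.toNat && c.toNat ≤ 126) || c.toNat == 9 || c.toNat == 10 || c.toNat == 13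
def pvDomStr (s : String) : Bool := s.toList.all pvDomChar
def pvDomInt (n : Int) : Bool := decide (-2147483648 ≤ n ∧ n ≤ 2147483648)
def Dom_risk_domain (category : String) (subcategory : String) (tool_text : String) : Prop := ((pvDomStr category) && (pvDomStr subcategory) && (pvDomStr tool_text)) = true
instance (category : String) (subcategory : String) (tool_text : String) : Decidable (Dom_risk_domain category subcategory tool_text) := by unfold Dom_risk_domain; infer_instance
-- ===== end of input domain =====

-- B replaces A's tiered any(token in text) if-chain by a single text-driven scan:
-- walk the positions of the lowered text once, prefix-match keywords there, keep the
-- smallest priority rank seen, and decode that rank into a label at the end.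

-- the lowered concatenation f"{category} {subcategory} {tool_text}".lower(), shared text value
def pvText (category subcategory tool_text : String) : List Char :=
  PySem.Chars.lower (category.toList ++ ' ' :: subcategory.toList ++ ' ' :: tool_text.toList)

-- any(token in text for token in toks)
def pvAnyIn (toks : List String) (text : List Char) : Bool :=
  toks.any (fun tok => PySem.Chars.isIn tok.toList text)

-- ===== PORT A =====
def risk_domain (category : String) (subcategory : String) (tool_text : String) : String :=
  let text := pvText category subcategory tool_text
  if pvAnyIn ["bank", "finance", "payment", "invoice", "order", "shopping", "commerce"] text then
    if pvAnyIn ["bank", "finance", "payment", "invoice"] text then "finance" else "commerce"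
  else if pvAnyIn ["medical", "health", "patient", "pharma", "prescription"] text then "healthcare"
  else if pvAnyIn ["security", "camera", "lock", "alarm", "iot"] text then "security"
  else if pvAnyIn ["employee", "hr", "payroll"] text then "hr"
  else if pvAnyIn ["student", "education", "course"] text then "education"
  else if pvAnyIn ["legal", "case", "contract"] text then "legal"
  else "personal_productivity"

-- ===== PORT B =====
def pvLabels : List String :=
  ["finance", "commerce", "healthcare", "security", "hr", "education", "legal"]

def pvTokens : List (String × Nat) :=
  [ ("bank", 0), ("finance", 0), ("payment", 0), ("invoice", 0),
    ("order", 1), ("shopping", 1), ("commerce", 1),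
    ("medical", 2), ("health", 2), ("patient", 2), ("pharma", 2), ("prescription", 2),
    ("security", 3), ("camera", 3), ("lock", 3), ("alarm", 3), ("iot", 3),
    ("employee", 4), ("hr", 4), ("payroll", 4),
    ("student", 5), ("education", 5), ("course", 5),
    ("legal", 6), ("case", 6), ("contract", 6) ]

-- body of B's inner loop: 'if rank < best and text.startswith(tok, i): best = rank';
-- text.startswith(tok, i) with 0 ≤ i is exactly Chars.startswith on the drop
def pvStep (text : List Char) (i : Nat) (best : Nat) (tr : String × Nat) : Nat :=
  if tr.2 < best && PySem.Chars.startswith (text.drop i) tr.1.toList then tr.2 else best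

-- range(len(text)) over the Nat indices is List.range text.length;
-- LABELS[best] with best < len(LABELS) is pvLabels.getD best _ (default unreachable).
def risk_domain_alt (category : String) (subcategory : String) (tool_text : String) : String :=
  let text := pvText category subcategory tool_text
  let best := (List.range text.length).foldl
    (fun best i => pvTokens.foldl (pvStep text i) best)
    pvLabels.length
  if best < pvLabels.length then pvLabels.getD best "" else "personal_productivity"

-- ===== PRECONDITION & SPEC =====
def Spec_risk_domain (category : String) (subcategory : String) (tool_text : String) (out : String) : Prop := out = risk_domain_alt category subcategory tool_text
instance (category : String) (subcategory : String) (tool_text : String) (out : String) : Decidable (Spec_risk_domain category subcategory tool_text out) := by unfold Spec_risk_domain; infer_instance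

-- ===== CLAIM (what is proved, stated in full; the proofs are below) =====
def Claim_equal_risk_domain : Prop := ∀ (category : String) (subcategory : String) (tool_text : String), Dom_risk_domain category subcategory tool_text → Spec_risk_domain category subcategory tool_text (risk_domain category subcategory tool_text)

-- ===== LEMMAS AND PROOFS =====

-- pull one min out of a fold of min-updates
theorem pv_fold_min_out {α : Type} (f : α → Nat) (p : α → Bool) :
    ∀ (l : List α) (b v : Nat),
      l.foldl (fun b t => if p t then min b (f t) else b) (min b v)
        = min (l.foldl (fun b t => if p t then min b (f t) else b) b) v := by
  intro l
  induction l with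
  | nil => intro b v; rfl
  | cons t ts ih =>
    intro b v
    have hstep : (if p t then min (min b v) (f t) else min b v)
        = min (if p t then min b (f t) else b) v := by
      cases hp : p t
      · simp
      · simp
        omega
    simp only [List.foldl_cons, hstep, ih]

-- two successive fold passes over the same list merge into one with or-ed conditions
theorem pv_fold_merge {α : Type} (f : α → Nat) (p q : α → Bool) :
    ∀ (l : List α) (b : Nat),
      l.foldl (fun b t => if q t then min b (f t) else b)
          (l.foldl (fun b t => if p t then min b (f t) else b) b)
        = l.foldl (fun b t => if p t || q t then min b (f t) else b) b := by
  intro l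
  induction l with
  | nil => intro b; rfl
  | cons t ts ih =>
    intro b
    have hcomm : ∀ (y : Nat),
        (if q t then min (ts.foldl (fun b t => if p t then min b (f t) else b) y) (f t)
         else ts.foldl (fun b t => if p t then min b (f t) else b) y)
        = ts.foldl (fun b t => if p t then min b (f t) else b)
            (if q t then min y (f t) else y) := by
      intro y
      cases hq : q t <;> simp [pv_fold_min_out]
    have hsteps : (if q t then min (if p t then min b (f t) else b) (f t)
            else (if p t then min b (f t) else b))
        = (if p t || q t then min b (f t) else b) := by
      cases hp : p t <;> cases hq : q t <;> simp <;> omega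
    simp only [List.foldl_cons]
    rw [hcomm, ← hsteps]
    exact ih _

-- the position loop around the token loop collapses to one token pass with an any-position hit test
theorem pv_swap {α : Type} (f : α → Nat) (q : Nat → α → Bool) :
    ∀ (idxs : List Nat) (l : List α) (b : Nat),
      idxs.foldl (fun b i => l.foldl (fun b t => if q i t then min b (f t) else b) b) b
        = l.foldl (fun b t => if idxs.any (fun i => q i t) then min b (f t) else b) b := by
  intro idxs
  induction idxs with
  | nil =>
    intro l b
    simp [List.foldl_fixed]
  | cons i rest ih =>
    intro l b
    simp only [List.foldl_cons, ih, List.any_cons]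
    exact pv_fold_merge f (fun t => q i t) (fun t => rest.any (fun j => q j t)) l b

-- a fold over tokens that all carry the same rank k is an if-any min-update
theorem pv_group_fold (k : Nat) (p : String × Nat → Bool) :
    ∀ (toks : List (String × Nat)), (∀ t ∈ toks, t.2 = k) →
      ∀ (b : Nat),
        toks.foldl (fun b t => if p t then min b t.2 else b) b
          = if toks.any p then min b k else b := by
  intro toks
  induction toks with
  | nil => intro _ b; simp
  | cons t ts ih =>
    intro hk b
    have ht : t.2 = k := hk t (by simp)
    have hts : ∀ t ∈ ts, t.2 = k := fun t h => hk t (by simp [h])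
    cases hp : p t with
    | false =>
      simp only [List.foldl_cons, hp, Bool.false_eq_true, if_false, List.any_cons, Bool.false_or]
      exact ih hts b
    | true =>
      rw [List.foldl_cons]
      simp only [hp, if_true, ht, List.any_cons, Bool.true_or]
      rw [ih hts (min b k)]
      split_ifs <;> omega

-- a keyword prefix-matches at some position of the text iff it is a substring of it
theorem pv_token_hit (tok : String) (text : List Char) (hne : tok.toList ≠ []) :
    ((List.range text.length).any
        (fun i => PySem.Chars.startswith (text.drop i) tok.toList))
      = PySem.Chars.isIn tok.toList text := by
  rw [Bool.eq_iff_iff]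
  simp only [List.any_eq_true, List.mem_range, PySem.Chars.startswith_iff]
  constructor
  · rintro ⟨i, _, hpre⟩
    exact (PySem.Chars.exists_prefix_drop_iff_isIn tok.toList text).mp ⟨i, hpre⟩
  · intro h
    obtain ⟨j, hpre⟩ := (PySem.Chars.exists_prefix_drop_iff_isIn tok.toList text).mpr h
    by_cases hj : j < text.length
    · exact ⟨j, hj, hpre⟩
    · exfalso
      rw [List.drop_eq_nil_of_le (by omega)] at hpre
      exact hne (List.prefix_nil.mp hpre)

-- the whole computation of B's best, evaluated to the tier booleans A tests
set_option maxRecDepth 8192 in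
set_option maxHeartbeats 1600000 in
theorem pv_best_eq (text : List Char) :
    ((List.range text.length).foldl
        (fun best i => pvTokens.foldl (pvStep text i) best)
        pvLabels.length)
      = (if pvAnyIn ["bank", "finance", "payment", "invoice"] text then 0
        else if pvAnyIn ["order", "shopping", "commerce"] text then 1
        else if pvAnyIn ["medical", "health", "patient", "pharma", "prescription"] text then 2
        else if pvAnyIn ["security", "camera", "lock", "alarm", "iot"] text then 3
        else if pvAnyIn ["employee", "hr", "payroll"] text then 4
        else if pvAnyIn ["student", "education", "course"] text then 5
        else if pvAnyIn ["legal", "case", "contract"] text then 6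
        else 7) := by
  -- the guarded update is a min-update
  have hf : ∀ (i : Nat), pvStep text i
      = fun best tr =>
          if PySem.Chars.startswith (text.drop i) tr.1.toList then min best tr.2 else best := by
    intro i
    funext best tr
    unfold pvStep
    cases hp : PySem.Chars.startswith (text.drop i) tr.1.toList
    · simp
    · simp only [Bool.and_true, decide_eq_true_eq]
      rw [Nat.min_def]
      split_ifs <;> omega
  simp only [hf]
  rw [pv_swap (fun tr : String × Nat => tr.2)
      (fun i tr => PySem.Chars.startswith (text.drop i) tr.1.toList)]
  -- split the token table into its seven rank groups
  have hsplit : pvTokens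
      = [(("bank" : String), 0), ("finance", 0), ("payment", 0), ("invoice", 0)]
        ++ [(("order" : String), 1), ("shopping", 1), ("commerce", 1)]
        ++ [(("medical" : String), 2), ("health", 2), ("patient", 2), ("pharma", 2), ("prescription", 2)]
        ++ [(("security" : String), 3), ("camera", 3), ("lock", 3), ("alarm", 3), ("iot", 3)]
        ++ [(("employee" : String), 4), ("hr", 4), ("payroll", 4)]
        ++ [(("student" : String), 5), ("education", 5), ("course", 5)]
        ++ [(("legal" : String), 6), ("case", 6), ("contract", 6)] := by rfl
  rw [hsplit]
  simp only [List.foldl_append]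
  rw [pv_group_fold 6 _ _ (by decide), pv_group_fold 5 _ _ (by decide),
      pv_group_fold 4 _ _ (by decide), pv_group_fold 3 _ _ (by decide),
      pv_group_fold 2 _ _ (by decide), pv_group_fold 1 _ _ (by decide),
      pv_group_fold 0 _ _ (by decide)]
  simp only [List.any_cons, List.any_nil, Bool.or_false]
  rw [pv_token_hit "bank" text (by decide), pv_token_hit "finance" text (by decide),
      pv_token_hit "payment" text (by decide), pv_token_hit "invoice" text (by decide),
      pv_token_hit "order" text (by decide), pv_token_hit "shopping" text (by decide),
      pv_token_hit "commerce" text (by decide), pv_token_hit "medical" text (by decide),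
      pv_token_hit "health" text (by decide), pv_token_hit "patient" text (by decide),
      pv_token_hit "pharma" text (by decide), pv_token_hit "prescription" text (by decide),
      pv_token_hit "security" text (by decide), pv_token_hit "camera" text (by decide),
      pv_token_hit "lock" text (by decide), pv_token_hit "alarm" text (by decide),
      pv_token_hit "iot" text (by decide), pv_token_hit "employee" text (by decide),
      pv_token_hit "hr" text (by decide), pv_token_hit "payroll" text (by decide),
      pv_token_hit "student" text (by decide), pv_token_hit "education" text (by decide),
      pv_token_hit "course" text (by decide), pv_token_hit "legal" text (by decide),
      pv_token_hit "case" text (by decide), pv_token_hit "contract" text (by decide)]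
  simp only [pvAnyIn, pvLabels, List.any_cons, List.any_nil, Bool.or_false,
    List.length_cons, List.length_nil]
  split_ifs <;> omega

-- ===== VERDICT (by name: the statement is the Claim_ definition above) =====
set_option maxRecDepth 8192 in
set_option maxHeartbeats 1600000 in
theorem risk_domain_spec : Claim_equal_risk_domain := by
  intro category subcategory tool_text _
  unfold Spec_risk_domain risk_domain risk_domain_alt
  dsimp only
  rw [pv_best_eq]
  have h7 : pvAnyIn ["bank", "finance", "payment", "invoice", "order", "shopping", "commerce"]
        (pvText category subcategory tool_text)
      = (pvAnyIn ["bank", "finance", "payment", "invoice"] (pvText category subcategory tool_text)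
        || pvAnyIn ["order", "shopping", "commerce"] (pvText category subcategory tool_text)) := by
    simp [pvAnyIn, Bool.or_assoc]
  rw [h7]
  cases pvAnyIn ["bank", "finance", "payment", "invoice"] (pvText category subcategory tool_text) <;>
    cases pvAnyIn ["order", "shopping", "commerce"] (pvText category subcategory tool_text) <;>
      split_ifs <;> simp_all [pvLabels]
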